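-- pv_equiv track=rewrite | github.com/Roxicaro/Mining_Incremental | ascii_designs.py | ascii_converter
-- ===== SOURCE A (Python) =====
-- def ascii_converter(input, color="\033[0m"):
--     output = []
--     lines = input.strip('\n').split('\n')
--
--     for y, line in enumerate(lines):
--         for x, char in enumerate(line):
--             if char != " ":
--                 output.append((f'{color}{char}\033[0m', x, y))
--     return output
-- ===== SOURCE B (Python) =====
-- def ascii_converter(input, color="\033[0m"):
--     # single pass with explicit coordinate counters instead of split + nested enumerate
--     out = []
--     x = y = 0
--     for ch in input.strip('\n'):
--         if ch == '\n':
--             x, y = 0, y + 1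
--         else:
--             if ch != ' ':
--                 out.append((f'{color}{ch}\033[0m', x, y))
--             x += 1
--     return out
-- ===== Notes on version B (the rewrite author's own statement) =====
-- stated objective: alternative
-- what changed: Replaces split('\n') plus nested enumerate loops by a single pass over the stripped string that maintains x/y counters explicitly, resetting x and bumping y at each newline.
import Mathlib
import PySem

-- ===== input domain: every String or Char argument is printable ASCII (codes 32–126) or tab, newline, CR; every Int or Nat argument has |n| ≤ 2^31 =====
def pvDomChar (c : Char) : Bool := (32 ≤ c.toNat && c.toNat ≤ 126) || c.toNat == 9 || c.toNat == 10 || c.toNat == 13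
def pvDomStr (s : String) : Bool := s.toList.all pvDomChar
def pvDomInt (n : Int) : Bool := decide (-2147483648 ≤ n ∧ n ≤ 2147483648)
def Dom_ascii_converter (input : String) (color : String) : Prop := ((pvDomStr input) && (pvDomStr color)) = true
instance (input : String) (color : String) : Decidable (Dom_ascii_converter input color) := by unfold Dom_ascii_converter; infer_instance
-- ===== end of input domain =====

-- B replaces strip+split+nested enumerate by one pass over the stripped string with explicit x/y counters (alternative decomposition, same cost); return values proved equal on the whole domain.


-- ===== PORT A =====
def ascii_converter (input : String) (color : String) : List (String × Int × Int) :=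
  let output : List (String × Int × Int) := []
  -- input.strip('\n').split('\n'): split with the nonempty one-char separator via Chars.splitOn (exact)
  let lines : List String :=
    (PySem.Chars.splitOn (PySem.Str.stripChars input "\n").toList "\n".toList).map String.ofList
  (PySem.List.enumerate lines).foldl (fun output yl =>
    (PySem.List.enumerate yl.2.toList).foldl (fun output xc =>
      if xc.2 ≠ ' ' then output ++ [(color ++ String.singleton xc.2 ++ "\x1b[0m", xc.1, yl.1)]
      else output) output) output

-- ===== PORT B =====
def ascii_converter_alt (input : String) (color : String) : List (String × Int × Int) :=
  let s := PySem.Str.stripChars input "\n"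
  (s.toList.foldl (fun (st : List (String × Int × Int) × Int × Int) ch =>
      if ch = '\n' then (st.1, 0, st.2.2 + 1)
      else if ch ≠ ' ' then
        (st.1 ++ [(color ++ String.singleton ch ++ "\x1b[0m", st.2.1, st.2.2)], st.2.1 + 1, st.2.2)
      else (st.1, st.2.1 + 1, st.2.2)) ([], 0, 0)).1

-- ===== PRECONDITION & SPEC =====
def Spec_ascii_converter (input : String) (color : String) (out : List (String × Int × Int)) : Prop := out = ascii_converter_alt input color
instance (input : String) (color : String) (out : List (String × Int × Int)) : Decidable (Spec_ascii_converter input color out) := by unfold Spec_ascii_converter; infer_instance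

-- ===== CLAIM (what is proved, stated in full; the proofs are below) =====
def Claim_equal_ascii_converter : Prop := ∀ (input : String) (color : String), Dom_ascii_converter input color → Spec_ascii_converter input color (ascii_converter input color)

-- ===== LEMMAS AND PROOFS =====

def pvItem (color : String) (c : Char) (x y : Int) : String × Int × Int :=
  (color ++ String.singleton c ++ "\x1b[0m", x, y)

/-- split on '\n', structural recursion -/
def pvLsplit : List Char → List (List Char)
  | [] => [[]]
  | c :: rest =>
    if c = '\n' then [] :: pvLsplit rest
    else match pvLsplit rest with
      | [] => [[c]]
      | h :: t => (c :: h) :: t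

def pvMapHead (pre : List Char) : List (List Char) → List (List Char)
  | [] => [pre]
  | h :: t => (pre ++ h) :: t

def pvAinner (color : String) : List Char → Int → Int → List (String × Int × Int)
  | [], _, _ => []
  | c :: t, x, y => (if c ≠ ' ' then [pvItem color c x y] else []) ++ pvAinner color t (x + 1) y

def pvAouter (color : String) : List (List Char) → Int → List (String × Int × Int)
  | [], _ => []
  | l :: ls, y => pvAinner color l 0 y ++ pvAouter color ls (y + 1)

def pvBgo (color : String) : List Char → Int → Int → List (String × Int × Int)
  | [], _, _ => []
  | c :: rest, x, y =>
    if c = '\n' then pvBgo color rest 0 (y + 1)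
    else (if c ≠ ' ' then [pvItem color c x y] else []) ++ pvBgo color rest (x + 1) y

theorem pvLsplit_ne_nil (cs : List Char) : pvLsplit cs ≠ [] := by
  cases cs with
  | nil => simp [pvLsplit]
  | cons c rest =>
    simp only [pvLsplit]
    split_ifs
    · simp
    · cases h : pvLsplit rest <;> simp

theorem pv_splitOn_go_eq : ∀ (l : List Char) (fuel : Nat), l.length ≤ fuel →
    ∀ (cur : List Char) (acc : List (List Char)),
    PySem.Chars.splitOn.go ['\n'] fuel l cur acc = acc.reverse ++ pvMapHead cur.reverse (pvLsplit l) := by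
  intro l
  induction l with
  | nil =>
    intro fuel _ cur acc
    cases fuel <;> simp [PySem.Chars.splitOn.go, pvLsplit, pvMapHead]
  | cons c rest ih =>
    intro fuel hf cur acc
    cases fuel with
    | zero => simp at hf
    | succ f =>
      by_cases hc : c = '\n'
      · subst hc
        have hpre : (['\n'] : List Char).isPrefixOf ('\n' :: rest) = true := by
          simp [List.isPrefixOf]
        rw [show PySem.Chars.splitOn.go ['\n'] (f + 1) ('\n' :: rest) cur acc
              = PySem.Chars.splitOn.go ['\n'] f rest [] (cur.reverse :: acc) from by
          simp [PySem.Chars.splitOn.go, hpre]]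
        rw [ih f (by simpa using hf) [] (cur.reverse :: acc)]
        cases h : pvLsplit rest with
        | nil => exact absurd h (pvLsplit_ne_nil rest)
        | cons h0 t => simp [pvLsplit, pvMapHead, h]
      · have hpre : (['\n'] : List Char).isPrefixOf (c :: rest) = false := by
          simp [List.isPrefixOf]
          exact fun h => absurd h.symm hc
        rw [show PySem.Chars.splitOn.go ['\n'] (f + 1) (c :: rest) cur acc
              = PySem.Chars.splitOn.go ['\n'] f rest (c :: cur) acc from by
          simp [PySem.Chars.splitOn.go, hpre]]
        rw [ih f (by simpa using hf) (c :: cur) acc]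
        cases h : pvLsplit rest with
        | nil => exact absurd h (pvLsplit_ne_nil rest)
        | cons h0 t => simp [pvLsplit, pvMapHead, h, hc]

theorem pv_splitOn_eq (cs : List Char) : PySem.Chars.splitOn cs ['\n'] = pvLsplit cs := by
  rw [PySem.Chars.splitOn, pv_splitOn_go_eq cs (cs.length + 1) (by omega) [] []]
  cases h : pvLsplit cs with
  | nil => exact absurd h (pvLsplit_ne_nil cs)
  | cons h0 t => simp [pvMapHead]

theorem pv_inner_fold (color : String) (l : List Char) : ∀ (x y : Int) (out : List (String × Int × Int)),
    (PySem.List.enumerate l x).foldl (fun output xc =>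
      if xc.2 ≠ ' ' then output ++ [(color ++ String.singleton xc.2 ++ "\x1b[0m", xc.1, y)]
      else output) out = out ++ pvAinner color l x y := by
  induction l with
  | nil => intro x y out; simp [PySem.List.enumerate, pvAinner]
  | cons c t ih =>
    intro x y out
    rw [PySem.List.enumerate_cons, List.foldl_cons, ih]
    by_cases hc : c = ' ' <;> simp [pvAinner, pvItem, hc]

theorem pv_outer_fold (color : String) (lines : List String) : ∀ (y : Int) (out : List (String × Int × Int)),
    (PySem.List.enumerate lines y).foldl (fun output yl =>
      (PySem.List.enumerate yl.2.toList).foldl (fun output xc =>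
        if xc.2 ≠ ' ' then output ++ [(color ++ String.singleton xc.2 ++ "\x1b[0m", xc.1, yl.1)]
        else output) output) out = out ++ pvAouter color (lines.map String.toList) y := by
  induction lines with
  | nil => intro y out; simp [PySem.List.enumerate, pvAouter]
  | cons l ls ih =>
    intro y out
    rw [PySem.List.enumerate_cons, List.foldl_cons, pv_inner_fold, ih]
    simp [pvAouter]

theorem pv_b_fold (color : String) (cs : List Char) : ∀ (out : List (String × Int × Int)) (x y : Int),
    (cs.foldl (fun (st : List (String × Int × Int) × Int × Int) ch =>
      if ch = '\n' then (st.1, 0, st.2.2 + 1)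
      else if ch ≠ ' ' then
        (st.1 ++ [(color ++ String.singleton ch ++ "\x1b[0m", st.2.1, st.2.2)], st.2.1 + 1, st.2.2)
      else (st.1, st.2.1 + 1, st.2.2)) (out, x, y)).1 = out ++ pvBgo color cs x y := by
  induction cs with
  | nil => intro out x y; simp [pvBgo]
  | cons c rest ih =>
    intro out x y
    by_cases hn : c = '\n'
    · rw [List.foldl_cons]; simp only [hn, if_pos rfl]; rw [ih]; simp [pvBgo]
    · rw [List.foldl_cons]
      by_cases hs : c = ' ' <;>
        · simp only [hn, hs, if_neg, ite_true, ite_false, ne_eq, not_true_eq_false,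
            not_false_eq_true]
          rw [ih]
          simp [pvBgo, pvItem, hn, hs]

theorem pv_bgo_eq (color : String) (cs : List Char) : ∀ (x y : Int),
    pvBgo color cs x y = (match pvLsplit cs with
      | [] => []
      | h :: t => pvAinner color h x y ++ pvAouter color t (y + 1)) := by
  induction cs with
  | nil => intro x y; simp [pvBgo, pvLsplit, pvAinner, pvAouter]
  | cons c rest ih =>
    intro x y
    by_cases hn : c = '\n'
    · subst hn
      rw [show pvBgo color ('\n' :: rest) x y = pvBgo color rest 0 (y + 1) from by simp [pvBgo]]
      rw [ih 0 (y + 1)]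
      cases h : pvLsplit rest with
      | nil => exact absurd h (pvLsplit_ne_nil rest)
      | cons h0 t => simp [pvLsplit, h, pvAinner, pvAouter]
    · rw [show pvBgo color (c :: rest) x y
            = (if c ≠ ' ' then [pvItem color c x y] else []) ++ pvBgo color rest (x + 1) y from by
          simp [pvBgo, hn]]
      rw [ih (x + 1) y]
      cases h : pvLsplit rest with
      | nil => exact absurd h (pvLsplit_ne_nil rest)
      | cons h0 t => simp [pvLsplit, h, hn, pvAinner]

theorem pv_bgo_zero (color : String) (cs : List Char) (y : Int) :
    pvBgo color cs 0 y = pvAouter color (pvLsplit cs) y := by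
  rw [pv_bgo_eq]
  cases h : pvLsplit cs with
  | nil => exact absurd h (pvLsplit_ne_nil cs)
  | cons h0 t => simp [pvAouter]

-- ===== VERDICT (by name: the statement is the Claim_ definition above) =====
theorem ascii_converter_spec : Claim_equal_ascii_converter := by
  intro input color _
  unfold Spec_ascii_converter ascii_converter ascii_converter_alt
  rw [pv_b_fold, pv_outer_fold]
  rw [show ("\n" : String).toList = ['\n'] from rfl]
  rw [pv_splitOn_eq, pv_bgo_zero]
  have : (String.toList ∘ String.ofList) = id := funext fun l => by simp
  simp [this]
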